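-- pv_equiv track=rewrite | github.com/voussoir/reddit | _old/Wikiname/wikiname.py | create_alphabet_headers
-- ===== SOURCE A (Python) =====
-- import string
--
-- def create_alphabet_headers(names):
--     finals = []
--     # This section is treated differently than the rest
--     # because we don't want to break them up by their
--     # initial character
--     finals.append('**0-9 and others**\n\n_____\n\n')
--     for (itemindex, item) in enumerate(names):
--         if item[1] not in string.ascii_letters:
--             finals.append(item + '\n\n')
--         else:
--             # Now the rest of the list contains alphabetic items only
--             names = names[itemindex:]
--             break
--
--     # Go through each item in the names list and place
--     # it into the proper bucket
--     alphasections = {}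
--     for item in names:
--         # [1] because we have a markdown bracket at 0
--         initial = item[1].upper()
--         item += '\n\n'
--         if initial in alphasections:
--             alphasections[initial].append(item)
--         else:
--             alphasections[initial] = [item]
--
--     # Go through each bucket and add their content to the final
--     for letter in string.ascii_uppercase:
--         finals.append('**' + letter + '**\n\n_____\n\n')
--         if letter not in alphasections:
--             continue
--         finals += alphasections[letter]
--
--     return finals
-- ===== SOURCE B (Python) =====
-- import string
--
-- def create_alphabet_headers(names):
--     finals = ['**0-9 and others**\n\n_____\n\n']
--     rest = names
--     while rest and rest[0][1] not in string.ascii_letters: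
--         finals.append(rest[0] + '\n\n')
--         rest = rest[1:]
--     for letter in string.ascii_uppercase:
--         finals.append('**' + letter + '**\n\n_____\n\n')
--         for item in rest:
--             if item[1].upper() == letter:
--                 finals.append(item + '\n\n')
--     return finals
-- ===== Notes on version B (the rewrite author's own statement) =====
-- stated objective: simpler
-- what changed: B drops A's dict-of-buckets index entirely: after the leading 'others' phase it emits each letter's section by rescanning the remaining list once per letter, preserving order without any intermediate structure.
import Mathlib
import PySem

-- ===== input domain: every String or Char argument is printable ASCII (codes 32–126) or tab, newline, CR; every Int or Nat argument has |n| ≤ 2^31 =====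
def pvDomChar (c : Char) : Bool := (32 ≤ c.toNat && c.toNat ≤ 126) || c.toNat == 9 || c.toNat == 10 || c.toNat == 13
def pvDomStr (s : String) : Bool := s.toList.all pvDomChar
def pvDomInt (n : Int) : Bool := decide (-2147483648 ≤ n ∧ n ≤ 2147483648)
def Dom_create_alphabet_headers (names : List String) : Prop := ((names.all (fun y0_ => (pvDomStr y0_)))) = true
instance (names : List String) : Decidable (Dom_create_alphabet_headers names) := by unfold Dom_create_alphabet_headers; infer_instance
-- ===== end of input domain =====

-- B replaces A's prebuilt dict of buckets by one ordered scan of the remainder per letter: simpler, no index structure.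

-- shared character helpers (both Pythons use string.ascii_letters / .upper() on item[1])
-- item[1]: Python raises IndexError on strings shorter than 2; Pre_ excludes those, so the default is never used
def pvChar1 (s : String) : Char := (PySem.Str.pyGet? s 1).getD ' '
-- c in string.ascii_letters (exact on the ASCII domain)
def pvIsLetter (c : Char) : Bool := ('a' ≤ c && c ≤ 'z') || ('A' ≤ c && c ≤ 'Z')
-- single-char str.upper() (exact on the ASCII domain)
def pvUpper (c : Char) : Char := if 'a' ≤ c && c ≤ 'z' then Char.ofNat (c.toNat - 32) else c
-- string.ascii_uppercase
def pvUppercase : List Char :=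
  ['A','B','C','D','E','F','G','H','I','J','K','L','M','N','O','P','Q','R','S','T','U','V','W','X','Y','Z']
def pvHeader (L : Char) : String := "**" ++ String.ofList [L] ++ "**\n\n_____\n\n"

-- ===== PORT A =====
-- A's first loop: enumerate(names); non-letter item[1] appended; on the first letter item reslice names = names[itemindex:] and break
def aOthersLoop : List String → Nat → List String → List String → (List String × List String)
  | [], _, finals, names => (finals, names)
  | item :: tl, i, finals, names =>
      if !(pvIsLetter (pvChar1 item)) then
        aOthersLoop tl (i + 1) (finals ++ [item ++ "\n\n"]) names
      else
        (finals, names.drop i)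

-- A's bucketing loop over the (resliced) names
def aBucketsFold (l : List String) (d : PySem.Dict Char (List String)) : PySem.Dict Char (List String) :=
  l.foldl (fun d item =>
    let initial := pvUpper (pvChar1 item)
    let item' := item ++ "\n\n"
    if d.contains initial then d.modify initial [] (fun xs => xs ++ [item'])
    else d.insert initial [item']) d

def create_alphabet_headers (names : List String) : List String :=
  let finals : List String := ["**0-9 and others**\n\n_____\n\n"]
  let p := aOthersLoop names 0 finals names
  let d := aBucketsFold p.2 PySem.Dict.empty
  pvUppercase.foldl (fun finals letter =>
    let finals := finals ++ [pvHeader letter]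
    match d.get? letter with
    | none => finals
    | some xs => finals ++ xs) p.1

-- ===== PORT B =====
-- B's first phase: pop leading non-letter items off the front of rest
def bOthersLoop : List String → List String → (List String × List String)
  | [], finals => (finals, [])
  | item :: tl, finals =>
      if !(pvIsLetter (pvChar1 item)) then bOthersLoop tl (finals ++ [item ++ "\n\n"])
      else (finals, item :: tl)

def create_alphabet_headers_alt (names : List String) : List String :=
  let p := bOthersLoop names ["**0-9 and others**\n\n_____\n\n"]
  pvUppercase.foldl (fun finals letter =>
    p.2.foldl (fun fs item =>
      if pvUpper (pvChar1 item) == letter then fs ++ [item ++ "\n\n"] else fs)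
      (finals ++ [pvHeader letter])) p.1

-- ===== PRECONDITION & SPEC =====
-- Pre_ excludes names containing a string shorter than 2 characters: item[1] raises IndexError in A there.
def Pre_create_alphabet_headers (names : List String) : Prop :=
  ∀ s ∈ names, 2 ≤ s.toList.length
instance (names : List String) : Decidable (Pre_create_alphabet_headers names) := by
  unfold Pre_create_alphabet_headers; infer_instance
def pvWitness_create_alphabet_headers : List String := ["[3]", "[b]", "[a]", "[7]"]

def Spec_create_alphabet_headers (names : List String) (out : List String) : Prop := out = create_alphabet_headers_alt names
instance (names : List String) (out : List String) : Decidable (Spec_create_alphabet_headers names out) := by unfold Spec_create_alphabet_headers; infer_instance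

-- ===== CLAIM (what is proved, stated in full; the proofs are below) =====
def Claim_equal_create_alphabet_headers : Prop := ∀ (names : List String), Dom_create_alphabet_headers names → Pre_create_alphabet_headers names → Spec_create_alphabet_headers names (create_alphabet_headers names)

-- ===== LEMMAS AND PROOFS =====

-- the items of l that land under letter L, in order, with the suffix appended
def fsel (l : List String) (L : Char) : List String :=
  (l.filter (fun it => pvUpper (pvChar1 it) == L)).map (· ++ "\n\n")

theorem fsel_nil (L : Char) : fsel [] L = [] := rfl

theorem fsel_cons (it : String) (tl : List String) (L : Char) :
    fsel (it :: tl) L = (if pvUpper (pvChar1 it) = L then [it ++ "\n\n"] else []) ++ fsel tl L := by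
  simp [fsel, List.filter_cons]
  split_ifs with h <;> simp_all

theorem aBucketsFold_cons (it : String) (tl : List String) (d : PySem.Dict Char (List String)) :
    aBucketsFold (it :: tl) d =
      aBucketsFold tl
        (if d.contains (pvUpper (pvChar1 it)) then
           d.modify (pvUpper (pvChar1 it)) [] (fun xs => xs ++ [it ++ "\n\n"])
         else d.insert (pvUpper (pvChar1 it)) [it ++ "\n\n"]) := rfl

-- A's bucket dict looked up at L is exactly the ordered selection fsel
theorem bucketsFold_getD (l : List String) :
    ∀ (d : PySem.Dict Char (List String)) (L : Char),
      (aBucketsFold l d).getD L [] = d.getD L [] ++ fsel l L := by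
  induction l with
  | nil => intro d L; simp [aBucketsFold, fsel]
  | cons it tl ih =>
    intro d L
    rw [aBucketsFold_cons, ih, fsel_cons]
    cases hc : d.contains (pvUpper (pvChar1 it)) with
    | true =>
      rw [if_pos rfl, PySem.Dict.getD_modify]
      by_cases hL : L = pvUpper (pvChar1 it)
      · simp [hL]
      · simp [hL, Ne.symm hL]
    | false =>
      rw [if_neg (by simp), PySem.Dict.getD_insert]
      by_cases hL : L = pvUpper (pvChar1 it)
      · have h0 : d.getD (pvUpper (pvChar1 it)) [] = [] := by
          simp [PySem.Dict.getD_of_not_contains, hc]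
        simp [hL, h0]
      · simp [hL, Ne.symm hL]

-- B's inner loop is init ++ fsel
theorem bInner (rest : List String) (init : List String) (L : Char) :
    rest.foldl (fun fs item =>
        if pvUpper (pvChar1 item) == L then fs ++ [item ++ "\n\n"] else fs) init
      = init ++ fsel rest L := by
  induction rest generalizing init with
  | nil => simp [fsel]
  | cons it tl ih =>
    simp only [List.foldl_cons, ih, fsel_cons]
    by_cases h : pvUpper (pvChar1 it) = L <;> simp [h]

-- the two phase-3 folds agree whenever the bucket lookups agree with fsel of B's rest
theorem fold3_eq (d : PySem.Dict Char (List String)) (l2 : List String) :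
    ∀ (letters : List Char) (acc : List String),
      (∀ L ∈ letters, (d.get? L).getD [] = fsel l2 L) →
      letters.foldl (fun finals letter =>
          let finals := finals ++ [pvHeader letter]
          match d.get? letter with
          | none => finals
          | some xs => finals ++ xs) acc
        = letters.foldl (fun finals letter =>
            l2.foldl (fun fs item =>
              if pvUpper (pvChar1 item) == letter then fs ++ [item ++ "\n\n"] else fs)
              (finals ++ [pvHeader letter])) acc := by
  intro letters
  induction letters with
  | nil => intro acc _; rfl
  | cons L tl ih =>
    intro acc h
    simp only [List.foldl_cons]
    rw [bInner, ← h L (by simp)]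
    have hst : (match d.get? L with
        | none => acc ++ [pvHeader L]
        | some xs => acc ++ [pvHeader L] ++ xs)
        = acc ++ [pvHeader L] ++ (d.get? L).getD [] := by
      cases d.get? L <;> simp
    rw [hst]
    exact ih _ (fun L' hL' => h L' (by simp [hL']))

-- phase 1: A's enumerate/reslice loop versus B's pop-the-front loop
theorem phase1 (names : List String) :
    ∀ (rest : List String) (i : Nat) (finals : List String),
      rest = names.drop i →
      (∀ it ∈ names.take i, pvIsLetter (pvChar1 it) = false) →
      (aOthersLoop rest i finals names).1 = (bOthersLoop rest finals).1 ∧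
      ((aOthersLoop rest i finals names).2 = (bOthersLoop rest finals).2 ∨
        ((∀ it ∈ names, pvIsLetter (pvChar1 it) = false) ∧
          (aOthersLoop rest i finals names).2 = names ∧
          (bOthersLoop rest finals).2 = [])) := by
  intro rest
  induction rest with
  | nil =>
    intro i finals hdrop htake
    refine ⟨rfl, Or.inr ⟨?_, rfl, rfl⟩⟩
    intro it hit
    have : it ∈ names.take i ++ names.drop i := by simp [hit]
    rw [← hdrop] at this
    simp at this
    exact htake it this
  | cons item tl ih =>
    intro i finals hdrop htake
    cases h : pvIsLetter (pvChar1 item) with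
    | true =>
      refine ⟨by simp [aOthersLoop, bOthersLoop, h], Or.inl ?_⟩
      simp [aOthersLoop, bOthersLoop, h, hdrop.symm]
    | false =>
      simp only [aOthersLoop, bOthersLoop, h, Bool.not_false]
      apply ih (i + 1)
      · have := congrArg List.tail hdrop
        simpa [List.tail_drop] using this
      · intro it hit
        rw [List.take_add_one] at hit
        rcases List.mem_append.mp hit with h1 | h2
        · exact htake it h1
        · have hsome : names[i]? = some item := by
            have h0 : (names.drop i)[0]? = names[i + 0]? := List.getElem?_drop
            rw [← hdrop] at h0
            simpa using h0.symm
          rw [hsome] at h2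
          simp at h2
          rw [h2]
          exact h

-- if c is not an ASCII letter, its upper case is itself and differs from every ASCII letter
theorem upper_ne_of_not_letter (c L : Char) (hc : pvIsLetter c = false)
    (hL : pvIsLetter L = true) : pvUpper c ≠ L := by
  have hupper : pvUpper c = c := by
    unfold pvUpper
    have h1 : ('a' ≤ c && c ≤ 'z') = false := by
      simp only [pvIsLetter, Bool.or_eq_false_iff] at hc
      exact hc.1
    rw [h1]
    simp
  rw [hupper]
  intro heq
  rw [heq, hL] at hc
  exact Bool.noConfusion hc

theorem fsel_eq_nil_of_not_letter (l : List String) (L : Char)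
    (hall : ∀ it ∈ l, pvIsLetter (pvChar1 it) = false)
    (hL : pvIsLetter L = true) : fsel l L = [] := by
  unfold fsel
  rw [List.filter_eq_nil_iff.mpr, List.map_nil]
  intro it hit
  simp only [beq_iff_eq]
  exact fun he => upper_ne_of_not_letter (pvChar1 it) L (hall it hit) hL he

theorem uppercase_bounds : ∀ L ∈ pvUppercase, pvIsLetter L = true :=
  List.all_eq_true.mp (by rfl)

-- ===== VERDICT (by name: the statement is the Claim_ definition above) =====
theorem create_alphabet_headers_spec : Claim_equal_create_alphabet_headers := by
  intro names _ _
  obtain ⟨h1, h2⟩ := phase1 names names 0 ["**0-9 and others**\n\n_____\n\n"]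
    (by simp) (by simp)
  have hAll : ∀ L ∈ pvUppercase,
      ((aBucketsFold (aOthersLoop names 0 ["**0-9 and others**\n\n_____\n\n"] names).2
          PySem.Dict.empty).get? L).getD []
        = fsel (bOthersLoop names ["**0-9 and others**\n\n_____\n\n"]).2 L := by
    intro L hL
    rw [← PySem.Dict.getD_eq_get?_getD, bucketsFold_getD, PySem.Dict.getD_empty, List.nil_append]
    rcases h2 with he | ⟨hall, ha, hb⟩
    · rw [he]
    · rw [ha, hb, fsel_nil]
      exact fsel_eq_nil_of_not_letter names L hall (uppercase_bounds L hL)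
  show create_alphabet_headers names = create_alphabet_headers_alt names
  unfold create_alphabet_headers create_alphabet_headers_alt
  simp only [h1]
  exact fold3_eq _ _ pvUppercase _ hAll
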